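-- pv_equiv track=rewrite | github.com/z-jxy/keepass_dump | keepass_dump.py | get_word_combinations
-- ===== SOURCE A (Python) =====
-- from collections import deque, OrderedDict
--
-- def get_word_combinations(chars, combinations, current="") -> deque:
--     if not chars:
--         combinations.append(current)
--         return
--
--     if chars.startswith("<{") and "}>" in chars:
--         opening_idx = chars.index("<{")
--         closing_idx = chars.index("}>")
--         options = chars[opening_idx + 2 : closing_idx].split(", ")
--         for option in options:
--             get_word_combinations(
--                 chars[closing_idx + 2 :], combinations, current + option
--             )
--     else:
--         get_word_combinations(chars[1:], combinations, current + chars[0])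
--
--     return combinations
-- ===== SOURCE B (Python) =====
-- def get_word_combinations(chars, combinations, current="") -> list:
--     # Tokenize once into segments (literal runs and option lists), then build
--     # all combinations by prefix accumulation (iterative cartesian product).
--     # Like A, this appends the results to `combinations` in place and returns it.
--     segments = []
--     lit = ""
--     i = 0
--     n = len(chars)
--     while i < n:
--         if chars.startswith("<{", i):
--             j = chars.find("}>", i)
--             if j != -1:
--                 if lit:
--                     segments.append([lit])
--                     lit = ""
--                 segments.append(chars[i + 2 : j].split(", "))
--                 i = j + 2
--                 continue
--         lit += chars[i]
--         i += 1
--     if lit: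
--         segments.append([lit])
--     prefixes = [current]
--     for seg in segments:
--         prefixes = [p + o for p in prefixes for o in seg]
--     combinations.extend(prefixes)
--     return combinations
-- ===== Notes on version B (the rewrite author's own statement) =====
-- stated objective: faster
-- what changed: B tokenizes the template once into literal/option segments in a single scan and then builds all results by iterative prefix accumulation (cartesian product), replacing A's per-character recursion with repeated string slicing; Pre_ excludes the empty template, on which A returns None instead of a list.
-- outside the precondition, e.g. on get_word_combinations('', [], ''): A returns None, B returns ['']
import Mathlib
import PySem

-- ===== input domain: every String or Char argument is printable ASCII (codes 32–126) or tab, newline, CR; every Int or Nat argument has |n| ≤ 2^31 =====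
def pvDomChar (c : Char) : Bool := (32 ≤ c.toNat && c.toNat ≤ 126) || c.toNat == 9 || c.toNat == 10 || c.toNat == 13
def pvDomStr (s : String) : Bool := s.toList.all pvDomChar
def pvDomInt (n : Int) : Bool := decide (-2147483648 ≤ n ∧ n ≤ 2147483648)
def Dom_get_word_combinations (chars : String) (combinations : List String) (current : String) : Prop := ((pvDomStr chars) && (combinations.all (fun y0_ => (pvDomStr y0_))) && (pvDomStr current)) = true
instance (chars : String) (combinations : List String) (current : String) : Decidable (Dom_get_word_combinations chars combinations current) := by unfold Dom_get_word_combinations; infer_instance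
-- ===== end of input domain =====

-- B tokenizes the template once into literal/option segments and expands by prefix
-- accumulation instead of A's slice-per-character recursion (faster); both append the
-- results to `combinations` (A mutates it in place; equivalence is about the return value,
-- B performs the same extension); Pre_ excludes the empty template, where A returns None.


-- termination helper: dropping past the first "}>" strictly shrinks the string
theorem pvRestLt (s : List Char) (hs : s ≠ [])
    (hf : 0 ≤ PySem.Chars.find s ['}', '>']) :
    (PySem.Chars.slice s (some (PySem.Chars.find s ['}', '>'] + 2)) none).length < s.length := by
  rw [PySem.Chars.slice_eq_listSlice, PySem.List.slice_from _ (by omega)]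
  have hlen : 0 < s.length := List.length_pos_iff.mpr hs
  simp only [List.length_drop]
  omega

-- ===== PORT A =====
-- A's recursion, with the mutated `combinations` list threaded as a value.
def pvGoA : List Char → List String → List Char → List String
  | [], combs, cur => combs ++ [String.ofList cur]
  | c :: cs, combs, cur =>
    if h : PySem.Chars.startswith (c :: cs) ['<', '{'] &&
           PySem.Chars.isIn ['}', '>'] (c :: cs) then
      let openingIdx := PySem.Chars.find (c :: cs) ['<', '{']
      let closingIdx := PySem.Chars.find (c :: cs) ['}', '>']
      let options := PySem.Chars.splitOn
        (PySem.Chars.slice (c :: cs) (some (openingIdx + 2)) (some closingIdx)) [',', ' ']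
      let rest := PySem.Chars.slice (c :: cs) (some (closingIdx + 2)) none
      options.foldl (fun acc opt => pvGoA rest acc (cur ++ opt)) combs
    else
      pvGoA cs combs (cur ++ [c])
termination_by s _ _ => s.length
decreasing_by
  · exact pvRestLt (c :: cs) (by simp)
      ((PySem.Chars.find_nonneg_iff _ _).mpr ((PySem.Chars.isIn_iff_infix _ _).mp (by
        simpa using (Bool.and_eq_true_iff.mp h).2)))
  · simp

def get_word_combinations (chars : String) (combinations : List String) (current : String) : List String :=
  pvGoA chars.toList combinations current.toList

-- ===== PORT B =====
-- B's single scan: literal runs and option blocks become segments (lists of options).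
def pvTokenize : List Char → List Char → List (List (List Char))
  | [], lit => if lit = [] then [] else [[lit]]
  | c :: cs, lit =>
    if PySem.Chars.startswith (c :: cs) ['<', '{'] then
      let j := PySem.Chars.find (c :: cs) ['}', '>']
      if j ≠ -1 then
        (if lit = [] then [] else [[lit]]) ++
        [PySem.Chars.splitOn (PySem.Chars.slice (c :: cs) (some 2) (some j)) [',', ' ']] ++
        pvTokenize (PySem.Chars.slice (c :: cs) (some (j + 2)) none) []
      else
        pvTokenize cs (lit ++ [c])
    else
      pvTokenize cs (lit ++ [c])
termination_by s _ => s.length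
decreasing_by
  · exact pvRestLt (c :: cs) (by simp)
      (by have := PySem.Chars.neg_one_le_find (c :: cs) ['}', '>']; omega)
  · simp
  · simp

def get_word_combinations_alt (chars : String) (combinations : List String) (current : String) : List String :=
  let segs := pvTokenize chars.toList []
  let prefixes := segs.foldl
    (fun ps seg => ps.flatMap (fun p => seg.map (fun o => p ++ o))) [current.toList]
  combinations ++ prefixes.map String.ofList

-- ===== PRECONDITION & SPEC =====
-- Pre_ excludes only the empty template string: there Python A returns None, not a list.
def Pre_get_word_combinations (chars : String) (combinations : List String) (current : String) : Prop :=
  chars ≠ ""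
instance (chars : String) (combinations : List String) (current : String) : Decidable (Pre_get_word_combinations chars combinations current) := by unfold Pre_get_word_combinations; infer_instance

def pvWitness_get_word_combinations : String × List String × String := ("a<{b, c}>d", ["w"], "x")

def Spec_get_word_combinations (chars : String) (combinations : List String) (current : String) (out : List String) : Prop := out = get_word_combinations_alt chars combinations current
instance (chars : String) (combinations : List String) (current : String) (out : List String) : Decidable (Spec_get_word_combinations chars combinations current out) := by unfold Spec_get_word_combinations; infer_instance

-- ===== CLAIM (what is proved, stated in full; the proofs are below) =====
def Claim_equal_get_word_combinations : Prop := ∀ (chars : String) (combinations : List String) (current : String), Dom_get_word_combinations chars combinations current → Pre_get_word_combinations chars combinations current → Spec_get_word_combinations chars combinations current (get_word_combinations chars combinations current)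

-- ===== LEMMAS AND PROOFS =====

-- product step of B, named for the proofs
def pvStep (ps : List (List Char)) (seg : List (List Char)) : List (List Char) :=
  ps.flatMap (fun p => seg.map (fun o => p ++ o))

-- a startswith hit means find = 0
theorem pvFindZero (s p : List Char) (h : PySem.Chars.startswith s p = true) :
    PySem.Chars.find s p = 0 := by
  have hpre : p <+: s := (PySem.Chars.startswith_iff _ _).mp h
  have hnn : 0 ≤ PySem.Chars.find s p :=
    (PySem.Chars.find_nonneg_iff _ _).mpr hpre.isInfix
  obtain ⟨-, hmin⟩ := PySem.Chars.find_spec (s := s) (sub := p) hnn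
  by_contra hne
  exact hmin 0 (by omega) (by simpa using hpre)

-- accumulator lemma for A's threaded `combinations` list
theorem pvGoA_accN : ∀ (n : Nat) (s : List Char), s.length ≤ n →
    ∀ (combs : List String) (cur : List Char),
    pvGoA s combs cur = combs ++ pvGoA s [] cur := by
  intro n
  induction n with
  | zero =>
    intro s hs combs cur
    have : s = [] := List.eq_nil_of_length_eq_zero (by omega)
    subst this; simp [pvGoA]
  | succ n ih =>
    intro s hs combs cur
    match s with
    | [] => simp [pvGoA]
    | c :: cs =>
      by_cases h : (PySem.Chars.startswith (c :: cs) ['<', '{'] &&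
           PySem.Chars.isIn ['}', '>'] (c :: cs)) = true
      · rw [pvGoA, pvGoA]
        simp only [dif_pos h]
        have hrest : (PySem.Chars.slice (c :: cs)
            (some (PySem.Chars.find (c :: cs) ['}', '>'] + 2)) none).length ≤ n := by
          have := pvRestLt (c :: cs) (by simp)
            ((PySem.Chars.find_nonneg_iff _ _).mpr ((PySem.Chars.isIn_iff_infix _ _).mp (by
              simpa using (Bool.and_eq_true_iff.mp h).2)))
          simp only [List.length_cons] at *
          omega
        generalize (PySem.Chars.slice (c :: cs)
            (some (PySem.Chars.find (c :: cs) ['}', '>'] + 2)) none) = rest at hrest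
        generalize PySem.Chars.splitOn _ _ = opts
        induction opts generalizing combs with
        | nil => simp
        | cons o os iho =>
          simp only [List.foldl_cons]
          rw [ih rest hrest combs (cur ++ o),
            iho (combs ++ pvGoA rest [] (cur ++ o)),
            iho (pvGoA rest [] (cur ++ o)), List.append_assoc]
      · rw [pvGoA, pvGoA]
        simp only [dif_neg h]
        exact ih cs (by simpa using Nat.lt_succ_iff.mp (by simpa using hs)) combs (cur ++ [c])

theorem pvGoA_acc (s : List Char) (combs : List String) (cur : List Char) :
    pvGoA s combs cur = combs ++ pvGoA s [] cur :=
  pvGoA_accN s.length s le_rfl combs cur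

-- A's option loop as a flatMap
theorem pvFoldl_flatMap (rest x : List Char) (opts : List (List Char)) :
    ∀ (a : List String),
    opts.foldl (fun acc opt => pvGoA rest acc (x ++ opt)) a =
      a ++ opts.flatMap (fun opt => pvGoA rest [] (x ++ opt)) := by
  induction opts with
  | nil => intro a; simp
  | cons o os iho =>
    intro a
    simp only [List.foldl_cons, List.flatMap_cons]
    rw [pvGoA_acc, iho, List.append_assoc]

-- distribution of the product fold over its starting prefixes
theorem pvFoldl_single (segs : List (List (List Char))) (xs : List (List Char)) :
    segs.foldl pvStep xs = xs.flatMap (fun x => segs.foldl pvStep [x]) := by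
  induction segs generalizing xs with
  | nil => simp
  | cons seg segs ih =>
    simp only [List.foldl_cons]
    rw [ih (pvStep xs seg)]
    have h1 : pvStep xs seg = xs.flatMap (fun x => pvStep [x] seg) := by
      simp [pvStep]
    rw [h1, List.flatMap_assoc]
    congr 1
    funext x
    rw [← ih (pvStep [x] seg)]

-- the key correspondence: A's recursion equals B's tokenize-then-product
theorem pvMainN : ∀ (n : Nat) (s : List Char), s.length ≤ n → ∀ (cur lit : List Char),
    pvGoA s [] (cur ++ lit) =
      ((pvTokenize s lit).foldl pvStep [cur]).map String.ofList := by
  intro n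
  induction n with
  | zero =>
    intro s hs cur lit
    have : s = [] := List.eq_nil_of_length_eq_zero (by omega)
    subst this
    by_cases hl : lit = [] <;> simp [pvGoA, pvTokenize, hl, pvStep]
  | succ n ih =>
    intro s hs cur lit
    match s with
    | [] => by_cases hl : lit = [] <;> simp [pvGoA, pvTokenize, hl, pvStep]
    | c :: cs =>
      by_cases hsw : PySem.Chars.startswith (c :: cs) ['<', '{'] = true
      · by_cases hin : PySem.Chars.isIn ['}', '>'] (c :: cs) = true
        · -- option block: both programs consume up to the first "}>"
          have hcond : (PySem.Chars.startswith (c :: cs) ['<', '{'] &&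
              PySem.Chars.isIn ['}', '>'] (c :: cs)) = true := by simp [hsw, hin]
          have hne : PySem.Chars.find (c :: cs) ['}', '>'] ≠ -1 :=
            (PySem.Chars.find_ne_neg_one_iff _ _).mpr ((PySem.Chars.isIn_iff_infix _ _).mp hin)
          have hrest : (PySem.Chars.slice (c :: cs)
              (some (PySem.Chars.find (c :: cs) ['}', '>'] + 2)) none).length ≤ n := by
            have := pvRestLt (c :: cs) (by simp)
              ((PySem.Chars.find_nonneg_iff _ _).mpr ((PySem.Chars.isIn_iff_infix _ _).mp hin))
            simp only [List.length_cons] at *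
            omega
          rw [pvGoA, pvTokenize]
          simp only [dif_pos hcond, if_pos hsw, if_pos hne, pvFindZero _ _ hsw, zero_add]
          rw [pvFoldl_flatMap _ _ _ [], List.nil_append]
          generalize hT : pvTokenize (PySem.Chars.slice (c :: cs)
              (some (PySem.Chars.find (c :: cs) ['}', '>'] + 2)) none) [] = T at *
          generalize hO : PySem.Chars.splitOn (PySem.Chars.slice (c :: cs) (some 2)
              (some (PySem.Chars.find (c :: cs) ['}', '>']))) [',', ' '] = options
          have hptw : ∀ opt : List Char, pvGoA (PySem.Chars.slice (c :: cs)
              (some (PySem.Chars.find (c :: cs) ['}', '>'] + 2)) none) [] ((cur ++ lit) ++ opt) =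
              (T.foldl pvStep [(cur ++ lit) ++ opt]).map String.ofList := by
            intro opt
            have h := ih _ hrest ((cur ++ lit) ++ opt) []
            rw [List.append_nil] at h
            rw [h, hT]
          simp only [hptw]
          rw [List.foldl_append, List.foldl_append]
          have hlit : List.foldl pvStep [cur] (if lit = [] then [] else [[lit]]) = [cur ++ lit] := by
            by_cases hl : lit = [] <;> simp [hl, pvStep]
          rw [hlit]
          have hstep1 : List.foldl pvStep [cur ++ lit] [options] =
              options.map (fun o => (cur ++ lit) ++ o) := by
            simp [pvStep]
          rw [hstep1, pvFoldl_single T]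
          simp [List.flatMap_map, List.map_flatMap]
        · -- "<{" but no "}>": both consume one character
          have hcond : ¬ ((PySem.Chars.startswith (c :: cs) ['<', '{'] &&
              PySem.Chars.isIn ['}', '>'] (c :: cs)) = true) := by simp [hin]
          have hfeq : PySem.Chars.find (c :: cs) ['}', '>'] = -1 :=
            (PySem.Chars.find_eq_neg_one_iff _ _).mpr
              (fun hif => hin ((PySem.Chars.isIn_iff_infix _ _).mpr hif))
          rw [pvGoA, pvTokenize]
          simp only [dif_neg hcond, if_pos hsw, hfeq]
          rw [if_neg (by simp)]
          have h := ih cs (by simp only [List.length_cons] at hs; omega) cur (lit ++ [c])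
          rw [← List.append_assoc] at h
          exact h
      · -- plain literal character
        have hcond : ¬ ((PySem.Chars.startswith (c :: cs) ['<', '{'] &&
            PySem.Chars.isIn ['}', '>'] (c :: cs)) = true) := by simp [hsw]
        rw [pvGoA, pvTokenize]
        simp only [dif_neg hcond, if_neg hsw]
        have h := ih cs (by simp only [List.length_cons] at hs; omega) cur (lit ++ [c])
        rw [← List.append_assoc] at h
        exact h

theorem pvMain (s cur lit : List Char) :
    pvGoA s [] (cur ++ lit) =
      ((pvTokenize s lit).foldl pvStep [cur]).map String.ofList :=
  pvMainN s.length s le_rfl cur lit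

-- ===== VERDICT (by name: the statement is the Claim_ definition above) =====
theorem get_word_combinations_spec : Claim_equal_get_word_combinations := by
  intro chars combinations current _hdom _hpre
  unfold Spec_get_word_combinations get_word_combinations get_word_combinations_alt
  rw [pvGoA_acc]
  have h := pvMain chars.toList current.toList []
  rw [List.append_nil] at h
  rw [h]
  rfl
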